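-- pv_equiv track=rewrite | github.com/pypi-data/pypi-mirror-390 | packages/mofaflex/mofaflex-0.1.0.tar.gz/mofaflex-0.1.0/tests/test_preprocessing_centerscale.py | combination_from_idx
-- ===== SOURCE A (Python) =====
-- def combination_from_idx(idx, n1, n2):
--     combidx = [0] * n1
--     for i in range(n1 - 1):
--         offset = n2 ** (n1 - (i + 1))
--         cidx = idx // offset
--         combidx[i] = cidx
--         idx -= cidx * offset
--     combidx[-1] = idx
--     return combidx
-- ===== SOURCE B (Python) =====
-- def combination_from_idx(idx, n1, n2):
--     m = n1 - 1
--     return [idx // n2 ** m] + [(idx % n2 ** (m - j)) // n2 ** (m - j - 1) for j in range(m)]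
-- ===== Notes on version B (the rewrite author's own statement) =====
-- stated objective: alternative
-- what changed: A updates a running remainder (idx -= cidx*offset) so each digit depends on loop state; B computes every digit independently by the closed-form ((idx % n2**(n1-1-j)) // n2**(n1-2-j)) with the head idx // n2**(n1-1), using the fact that A's running remainder equals idx mod the current power.
import Mathlib
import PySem

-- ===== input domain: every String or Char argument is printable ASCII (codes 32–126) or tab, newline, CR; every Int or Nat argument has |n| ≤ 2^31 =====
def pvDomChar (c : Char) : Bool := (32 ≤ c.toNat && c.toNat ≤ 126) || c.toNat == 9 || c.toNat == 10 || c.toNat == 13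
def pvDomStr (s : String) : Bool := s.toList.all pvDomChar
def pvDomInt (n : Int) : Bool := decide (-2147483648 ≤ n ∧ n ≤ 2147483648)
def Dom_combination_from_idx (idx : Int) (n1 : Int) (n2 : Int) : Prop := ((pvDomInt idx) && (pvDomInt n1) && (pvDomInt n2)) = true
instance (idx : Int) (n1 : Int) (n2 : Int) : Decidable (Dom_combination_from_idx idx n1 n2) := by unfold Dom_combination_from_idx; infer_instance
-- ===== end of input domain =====

-- B replaces A's stateful remainder-update loop by a closed-form formula for each digit
-- ((idx % n2^(m-j)) // n2^(m-j-1)), so digits no longer depend on a running state (objective: alternative).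

-- ===== PORT A =====
-- A's loop: for i in range(n1-1): offset = n2**(n1-1-i); cidx = idx//offset; store cidx; idx -= cidx*offset;
-- then the last slot gets the remaining idx.  The structural recursion carries the same state
-- (remaining idx, decreasing exponent); writing position i becomes the cons at depth i.
def goA (n2 : Int) : Nat → Int → List Int
  | 0, idx => [idx]
  | Nat.succ k, idx =>
      let offset := n2 ^ (k + 1)
      let cidx := PySem.Int.floordiv idx offset
      cidx :: goA n2 k (idx - cidx * offset)

def combination_from_idx (idx : Int) (n1 : Int) (n2 : Int) : List Int :=
  if 1 ≤ n1 then goA n2 (n1 - 1).toNat idx else []   -- n1 ≤ 0: Python raises IndexError (outside Pre_)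

-- ===== PORT B =====
-- Source B: m = n1-1; [idx // n2**m] + [(idx % n2**(m-j)) // n2**(m-j-1) for j in range(m)]
def combination_from_idx_alt (idx : Int) (n1 : Int) (n2 : Int) : List Int :=
  let m := (n1 - 1).toNat
  PySem.Int.floordiv idx (n2 ^ m) ::
    (List.range m).map (fun j =>
      PySem.Int.floordiv (PySem.Int.mod idx (n2 ^ (m - j))) (n2 ^ (m - j - 1)))

-- ===== PRECONDITION & SPEC =====
-- Pre_ excludes exactly the inputs where Python A raises: n1 ≤ 0 (IndexError on combidx[-1])
-- and n2 = 0 with n1 ≥ 2 (ZeroDivisionError on idx // 0).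
def Pre_combination_from_idx (idx : Int) (n1 : Int) (n2 : Int) : Prop :=
  1 ≤ n1 ∧ (n2 ≠ 0 ∨ n1 = 1)
instance (idx : Int) (n1 : Int) (n2 : Int) : Decidable (Pre_combination_from_idx idx n1 n2) := by
  unfold Pre_combination_from_idx; infer_instance

def pvWitness_combination_from_idx : Int × Int × Int := (11, 3, 2)

def Spec_combination_from_idx (idx : Int) (n1 : Int) (n2 : Int) (out : List Int) : Prop := out = combination_from_idx_alt idx n1 n2
instance (idx : Int) (n1 : Int) (n2 : Int) (out : List Int) : Decidable (Spec_combination_from_idx idx n1 n2 out) := by unfold Spec_combination_from_idx; infer_instance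

-- ===== CLAIM (what is proved, stated in full; the proofs are below) =====
def Claim_equal_combination_from_idx : Prop := ∀ (idx : Int) (n1 : Int) (n2 : Int), Dom_combination_from_idx idx n1 n2 → Pre_combination_from_idx idx n1 n2 → Spec_combination_from_idx idx n1 n2 (combination_from_idx idx n1 n2)

-- ===== LEMMAS AND PROOFS =====

-- A's remainder update is the floored mod: idx - (idx // b) * b = idx % b.
theorem sub_floordiv_mul_eq_mod (a b : Int) :
    a - PySem.Int.floordiv a b * b = PySem.Int.mod a b := by
  have := PySem.Int.floordiv_mul_add_mod a b
  linarith

-- A's running remainder before writing slot m-k is idx % n2^(k+1); hence each digit of A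
-- equals B's closed-form digit.
theorem goA_eq_closed (n2 : Int) (m : Nat) : ∀ idx : Int,
    goA n2 m idx =
      PySem.Int.floordiv idx (n2 ^ m) ::
        (List.range m).map (fun j =>
          PySem.Int.floordiv (PySem.Int.mod idx (n2 ^ (m - j))) (n2 ^ (m - j - 1))) := by
  induction m with
  | zero => intro _; simp [goA, PySem.Int.floordiv]
  | succ k ih =>
    intro idx
    have hr : idx - PySem.Int.floordiv idx (n2 ^ (k + 1)) * n2 ^ (k + 1)
        = PySem.Int.mod idx (n2 ^ (k + 1)) := sub_floordiv_mul_eq_mod _ _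
    have hmm : ∀ j : Nat, j < k →
        PySem.Int.mod (PySem.Int.mod idx (n2 ^ (k + 1))) (n2 ^ (k - j))
          = PySem.Int.mod idx (n2 ^ (k - j)) := by
      intro j hj
      show Int.fmod (Int.fmod idx (n2 ^ (k + 1))) (n2 ^ (k - j)) = Int.fmod idx (n2 ^ (k - j))
      exact Int.fmod_fmod_of_dvd idx (pow_dvd_pow n2 (by omega))
    simp only [goA, hr, ih, List.range_succ_eq_map, List.map_cons, List.map_map]
    congr 1
    congr 1
    apply List.map_congr_left
    intro j hj
    simp only [Function.comp]
    rw [hmm j (List.mem_range.mp hj)]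
    simp [Nat.succ_sub_succ]

-- ===== VERDICT (by name: the statement is the Claim_ definition above) =====
theorem combination_from_idx_spec : Claim_equal_combination_from_idx := by
  intro idx n1 n2 _ hpre
  unfold Spec_combination_from_idx combination_from_idx combination_from_idx_alt
  rw [if_pos hpre.1]
  exact goA_eq_closed n2 (n1 - 1).toNat idx
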